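-- pv_equiv track=rewrite | github.com/cfop-user/cfop-user.github.io | md-to-html/utils.py | count_leading_hashtags
-- ===== SOURCE A (Python) =====
-- def count_leading_hashtags(line:str) -> int:
--     count = 0
--     for char in line:
--         if char == "#":
--             count += 1
--         elif char == " ":
--             # Potentially difficult to see why this works here.
--             # It's because we want the first non hashtag to be a space
--             return count
--         else:
--             return 0
--     return count
-- ===== SOURCE B (Python) =====
-- def count_leading_hashtags(line: str) -> int:
--     count = len(line) - len(line.lstrip('#'))
--     if count == len(line):
--         return count
--     return count if line[count] == ' ' else 0
-- ===== Notes on version B (the rewrite author's own statement) =====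
-- stated objective: simpler
-- what changed: Replaces the character loop with a direct prefix measurement (len minus len of line.lstrip('#')) followed by a single positional branch on the first non-hash character.
import Mathlib
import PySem

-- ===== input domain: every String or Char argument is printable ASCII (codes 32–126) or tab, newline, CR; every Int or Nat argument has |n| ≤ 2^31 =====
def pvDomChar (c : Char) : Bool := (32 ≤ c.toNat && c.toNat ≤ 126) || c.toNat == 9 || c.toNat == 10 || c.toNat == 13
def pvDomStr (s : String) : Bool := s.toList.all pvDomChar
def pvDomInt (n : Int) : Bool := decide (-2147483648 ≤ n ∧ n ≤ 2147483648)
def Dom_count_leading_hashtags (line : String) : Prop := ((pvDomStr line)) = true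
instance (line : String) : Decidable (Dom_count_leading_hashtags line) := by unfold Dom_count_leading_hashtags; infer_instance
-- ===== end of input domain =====

-- B replaces A's character loop by a prefix measurement (len − len after stripping '#')
-- followed by one positional branch; objective: simpler.

-- ===== PORT A =====
-- the for-loop over the characters with accumulator `count`
def pvGoA : List Char → Int → Int
  | [], count => count
  | ch :: rest, count =>
    if ch = '#' then pvGoA rest (count + 1)
    else if ch = ' ' then count
    else 0

def count_leading_hashtags (line : String) : Int := pvGoA line.toList 0

-- ===== PORT B =====
-- count = len(line) - len(line.lstrip('#')); lstrip('#') on a list of chars is dropWhile (= '#')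
def count_leading_hashtags_alt (line : String) : Int :=
  let l := line.toList
  let count : Int := (l.length : Int) - ((l.dropWhile (· = '#')).length : Int)
  if count = (l.length : Int) then count
  else if PySem.List.pyGet? l count = some ' ' then count else 0

-- ===== PRECONDITION & SPEC =====
def Spec_count_leading_hashtags (line : String) (out : Int) : Prop := out = count_leading_hashtags_alt line
instance (line : String) (out : Int) : Decidable (Spec_count_leading_hashtags line out) := by unfold Spec_count_leading_hashtags; infer_instance

-- ===== CLAIM (what is proved, stated in full; the proofs are below) =====
def Claim_equal_count_leading_hashtags : Prop := ∀ (line : String), Dom_count_leading_hashtags line → Spec_count_leading_hashtags line (count_leading_hashtags line)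

-- ===== LEMMAS AND PROOFS =====

-- A's loop: counts the leading '#' run into the accumulator, then decides on the first other char.
theorem pvGoA_eq (l : List Char) (c : Int) :
    pvGoA l c =
      match l.dropWhile (· = '#') with
      | [] => c + ((l.takeWhile (· = '#')).length : Int)
      | ch :: _ => if ch = ' ' then c + ((l.takeWhile (· = '#')).length : Int) else 0 := by
  induction l generalizing c with
  | nil => simp [pvGoA]
  | cons ch rest ih =>
    by_cases h : ch = '#'
    · subst h
      simp only [pvGoA]
      rw [ih]
      simp only [List.dropWhile_cons, List.takeWhile_cons, decide_true, if_true, List.length_cons]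
      cases hd : rest.dropWhile (· = '#') with
      | nil => push_cast; ring
      | cons y ys =>
        dsimp only
        split_ifs with hy
        · push_cast; ring
        · rfl
    · simp only [pvGoA, List.dropWhile_cons, List.takeWhile_cons, decide_eq_true_eq, if_neg h]
      split_ifs with hs <;> simp

theorem count_leading_hashtags_key (l : List Char) :
    pvGoA l 0 =
      (if ((l.length : Int) - ((l.dropWhile (· = '#')).length : Int)) = (l.length : Int)
       then (l.length : Int) - ((l.dropWhile (· = '#')).length : Int)
       else if PySem.List.pyGet? l ((l.length : Int) - ((l.dropWhile (· = '#')).length : Int))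
              = some ' '
            then (l.length : Int) - ((l.dropWhile (· = '#')).length : Int)
            else 0) := by
  obtain ⟨t, ht⟩ : ∃ t, l.takeWhile (· = '#') = t := ⟨_, rfl⟩
  have hsplit : t ++ l.dropWhile (· = '#') = l := by
    rw [← ht]; exact List.takeWhile_append_dropWhile
  have hlen : (l.length : Int) - ((l.dropWhile (· = '#')).length : Int) = (t.length : Int) := by
    have := congrArg List.length hsplit
    simp only [List.length_append] at this
    omega
  rw [pvGoA_eq, ht, hlen]
  cases hd : l.dropWhile (· = '#') with
  | nil =>
    rw [hd] at hlen
    simp only [List.length_nil, Nat.cast_zero, sub_zero] at hlen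
    rw [if_pos hlen.symm, zero_add]
  | cons ch rest =>
    rw [hd] at hlen hsplit
    have hne : (t.length : Int) ≠ (l.length : Int) := by
      have := congrArg List.length hsplit
      simp only [List.length_append, List.length_cons] at this
      omega
    rw [if_neg hne]
    have hget : PySem.List.pyGet? l ((t.length : Nat) : Int) = some ch := by
      rw [← hsplit]
      simp
    rw [hget]
    simp only [Option.some.injEq]
    split_ifs with hch
    · exact zero_add _
    · rfl

theorem count_leading_hashtags_eq (line : String) :
    count_leading_hashtags line = count_leading_hashtags_alt line :=
  count_leading_hashtags_key line.toList

-- ===== VERDICT (by name: the statement is the Claim_ definition above) =====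
theorem count_leading_hashtags_spec : Claim_equal_count_leading_hashtags := by
  intro line _
  exact count_leading_hashtags_eq line
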